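-- pv_equiv track=rewrite | github.com/ALaevens/Connect4 | test.py | maxAdjacent
-- ===== SOURCE A (Python) =====
-- def maxAdjacent(ls):
--     pScore = 0
--     oScore = 0
--
--     runningTotalP = 0
--     runningTotalO = 0
--     for piece in ls:
--         if piece == 1:
--             oScore = max(oScore, runningTotalO)
--             runningTotalO = 0
--
--             runningTotalP +=1
--
--         elif piece != 0:
--             pScore = max(pScore, runningTotalP)
--             runningTotalP = 0
--
--             runningTotalO +=1
--
--     pScore = max(pScore, runningTotalP)
--     oScore = max(oScore, runningTotalO)
--
--     return pScore, oScore
-- ===== SOURCE B (Python) =====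
-- def maxAdjacent(ls):
--     # zeros are ignored (not separators); group the remaining pieces into
--     # maximal runs of same label (piece == 1 vs other nonzero) and take max lengths
--     fs = [x == 1 for x in ls if x != 0]
--     pScore = 0
--     oScore = 0
--     rest = fs
--     while rest:
--         b = rest[0]
--         k = 1
--         while k < len(rest) and rest[k] == b:
--             k += 1
--         if b:
--             pScore = max(pScore, k)
--         else:
--             oScore = max(oScore, k)
--         rest = rest[k:]
--     return pScore, oScore
-- ===== Notes on version B (the rewrite author's own statement) =====
-- stated objective: alternative
-- what changed: B first filters out the ignored zeros and labels each surviving piece (== 1 vs other nonzero), then scans maximal same-label runs with a two-level group loop and takes the max run length per label, instead of A's interleaved running-counter-with-reset accumulators.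
import Mathlib
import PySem

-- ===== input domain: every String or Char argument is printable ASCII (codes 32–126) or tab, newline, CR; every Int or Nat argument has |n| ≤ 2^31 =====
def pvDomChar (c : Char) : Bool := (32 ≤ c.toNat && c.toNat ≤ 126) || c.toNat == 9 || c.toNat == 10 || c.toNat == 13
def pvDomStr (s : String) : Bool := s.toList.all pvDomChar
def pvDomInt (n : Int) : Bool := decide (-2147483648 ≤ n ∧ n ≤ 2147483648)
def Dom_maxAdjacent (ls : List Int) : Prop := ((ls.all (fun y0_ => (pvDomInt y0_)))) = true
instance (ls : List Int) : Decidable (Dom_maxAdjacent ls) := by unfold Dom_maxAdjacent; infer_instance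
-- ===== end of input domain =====

-- B filters the zeros out first, labels the survivors (piece == 1 vs other), and scans
-- maximal same-label runs, replacing A's interleaved running-counter/reset accumulators
-- (objective: alternative decomposition, same cost).

-- ===== PORT A =====
-- A's loop body, step for step (3-way branch in A's order)
def pvStepA (st : Int × Int × Int × Int) (piece : Int) : Int × Int × Int × Int :=
  let (pScore, oScore, runningTotalP, runningTotalO) := st
  if piece == 1 then (pScore, max oScore runningTotalO, runningTotalP + 1, 0)
  else if piece != 0 then (max pScore runningTotalP, oScore, 0, runningTotalO + 1)
  else (pScore, oScore, runningTotalP, runningTotalO)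

def maxAdjacent (ls : List Int) : Int × Int :=
  let s := ls.foldl pvStepA (0, 0, 0, 0)
  (max s.1 s.2.2.1, max s.2.1 s.2.2.2)

-- ===== PORT B =====
-- outer while loop of Source B: consume one maximal run of equal labels per step
def pvAltLoop (pScore oScore : Int) (rest : List Bool) : Int × Int :=
  match rest with
  | [] => (pScore, oScore)
  | b :: t =>
      -- inner while: k = length of the maximal run starting at position 0
      let k : Int := 1 + (t.takeWhile (fun x => x == b)).length
      let rest' := t.dropWhile (fun x => x == b)
      if b then pvAltLoop (max pScore k) oScore rest'
      else pvAltLoop pScore (max oScore k) rest'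
termination_by rest.length
decreasing_by
  all_goals
    simp only [List.length_cons]
    have := List.length_dropWhile_le (fun x => x == b) t
    omega

def maxAdjacent_alt (ls : List Int) : Int × Int :=
  pvAltLoop 0 0 ((ls.filter (fun x => x != 0)).map (fun x => x == 1))

-- ===== PRECONDITION & SPEC =====
def Spec_maxAdjacent (ls : List Int) (out : Int × Int) : Prop := out = maxAdjacent_alt ls
instance (ls : List Int) (out : Int × Int) : Decidable (Spec_maxAdjacent ls out) := by unfold Spec_maxAdjacent; infer_instance

-- ===== CLAIM (what is proved, stated in full; the proofs are below) =====
def Claim_equal_maxAdjacent : Prop := ∀ (ls : List Int), Dom_maxAdjacent ls → Spec_maxAdjacent ls (maxAdjacent ls)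

-- ===== LEMMAS AND PROOFS =====

-- reference: best/current run tracker for label b over a Bool list
def pvMR (b : Bool) : List Bool → Int → Int → Int
  | [], cur, best => max best cur
  | x :: t, cur, best => if x == b then pvMR b t (cur + 1) best else pvMR b t 0 (max best cur)

-- A's Bool-level step
def pvStepB (st : Int × Int × Int × Int) (b : Bool) : Int × Int × Int × Int :=
  let (p, o, rp, ro) := st
  if b then (p, max o ro, rp + 1, 0) else (max p rp, o, 0, ro + 1)

theorem pvStepA_one (st : Int × Int × Int × Int) : pvStepA st 1 = pvStepB st true := by
  obtain ⟨p, o, rp, ro⟩ := st; simp [pvStepA, pvStepB]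

theorem pvStepA_zero (st : Int × Int × Int × Int) : pvStepA st 0 = st := by
  obtain ⟨p, o, rp, ro⟩ := st; simp [pvStepA]

theorem pvStepA_other (st : Int × Int × Int × Int) (x : Int) (h1 : x ≠ 1) (h0 : x ≠ 0) :
    pvStepA st x = pvStepB st false := by
  obtain ⟨p, o, rp, ro⟩ := st; simp [pvStepA, pvStepB, h0, h1]

-- A's fold over ints = A's fold over the filtered/labelled list
theorem pvFoldBridge (ls : List Int) (st : Int × Int × Int × Int) :
    ls.foldl pvStepA st
    = ((ls.filter (fun x => x != 0)).map (fun x => x == 1)).foldl pvStepB st := by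
  induction ls generalizing st with
  | nil => rfl
  | cons x t ih =>
      by_cases h1 : x = 1
      · subst h1
        simp only [List.foldl_cons, List.filter_cons]
        norm_num
        rw [pvStepA_one, ih]
      · by_cases h0 : x = 0
        · subst h0
          simp only [List.foldl_cons, List.filter_cons]
          norm_num
          rw [pvStepA_zero, ih]
        · have hx1 : (x == 1) = false := by simp [h1]
          simp only [List.foldl_cons, List.filter_cons]
          norm_num [h0, h1]
          simp only [hx1]
          rw [pvStepA_other st x h1 h0, ih]

-- A's fold decomposes into two independent run trackers
theorem pvFoldMR (bs : List Bool) (p o rp ro : Int) :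
    (let s := bs.foldl pvStepB (p, o, rp, ro)
     ((max s.1 s.2.2.1, max s.2.1 s.2.2.2) : Int × Int))
    = (pvMR true bs rp p, pvMR false bs ro o) := by
  induction bs generalizing p o rp ro with
  | nil => simp [pvMR]
  | cons b t ih =>
      cases b <;> simp [List.foldl, pvStepB, pvMR, ih]

theorem pvMR_run {b : Bool} (r : List Bool) (rest : List Bool) (cur best : Int)
    (h : ∀ x ∈ r, x = b) : pvMR b (r ++ rest) cur best = pvMR b rest (cur + r.length) best := by
  induction r generalizing cur with
  | nil => simp
  | cons x t ih =>
      have hx : (x == b) = true := by simp [h x (by simp)]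
      simp only [List.cons_append, pvMR, hx, if_true]
      rw [ih (cur + 1) (fun y hy => h y (by simp [hy]))]
      congr 1
      simp only [List.length_cons]
      push_cast
      omega

theorem pvMR_skip {b : Bool} (r : List Bool) (rest : List Bool) (best : Int)
    (hb : 0 ≤ best) (h : ∀ x ∈ r, x ≠ b) :
    pvMR b (r ++ rest) 0 best = pvMR b rest 0 best := by
  induction r with
  | nil => simp
  | cons x t ih =>
      have hx : (x == b) = false := by simpa using h x (by simp)
      simp only [List.cons_append, pvMR, hx, Bool.false_eq_true, if_false]
      rw [max_eq_left hb]
      exact ih (fun y hy => h y (by simp [hy]))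

theorem pvMR_reset {b : Bool} (rest : List Bool) (cur best : Int)
    (hc : 0 ≤ cur) (h : ∀ x, rest.head? = some x → x ≠ b) :
    pvMR b rest cur best = pvMR b rest 0 (max best cur) := by
  have hnn : (0 : Int) ≤ max best cur := le_trans hc (le_max_right best cur)
  cases rest with
  | nil =>
      show max best cur = max (max best cur) 0
      rw [max_eq_left hnn]
  | cons x t =>
      have hx : (x == b) = false := by simpa using h x rfl
      simp only [pvMR, hx, Bool.false_eq_true, if_false]
      rw [max_eq_left hnn]

theorem pvHead_dropWhile {b : Bool} (t : List Bool) (x : Bool)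
    (hx : (t.dropWhile (fun y => y == b)).head? = some x) : x ≠ b := by
  induction t with
  | nil => simp [List.dropWhile] at hx
  | cons y t ih =>
      by_cases hy : (y == b) = true
      · simp only [List.dropWhile_cons, hy, if_true] at hx
        exact ih hx
      · have hy' : (y == b) = false := by simpa using hy
        simp only [List.dropWhile_cons, hy', Bool.false_eq_true, if_false] at hx
        simp only [List.head?_cons, Option.some.injEq] at hx
        subst hx
        simpa using hy

-- B's loop computes the same two run trackers
theorem pvAltLoopMR : ∀ (n : ℕ) (bs : List Bool), bs.length ≤ n → ∀ (p o : Int),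
    0 ≤ p → 0 ≤ o → pvAltLoop p o bs = (pvMR true bs 0 p, pvMR false bs 0 o) := by
  intro n
  induction n with
  | zero =>
      intro bs hlen p o hp ho
      have : bs = [] := List.eq_nil_of_length_eq_zero (Nat.le_zero.mp hlen)
      subst this
      simp only [pvAltLoop, pvMR, Prod.mk.injEq]
      constructor <;> omega
  | succ n ih =>
      intro bs hlen p o hp ho
      cases bs with
      | nil =>
          simp only [pvAltLoop, pvMR, Prod.mk.injEq]
          constructor <;> omega
      | cons b t =>
          have hsplit : t = t.takeWhile (fun x => x == b) ++ t.dropWhile (fun x => x == b) :=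
            (List.takeWhile_append_dropWhile).symm
          set r := t.takeWhile (fun x => x == b) with hr
          set rest := t.dropWhile (fun x => x == b) with hrest
          have hrestlen : rest.length ≤ n := by
            have h1 : rest.length ≤ t.length := by
              rw [hrest]; exact List.length_dropWhile_le _ t
            simp only [List.length_cons] at hlen
            omega
          have hrun : ∀ x ∈ r, x = b := by
            intro x hxmem
            have := List.mem_takeWhile_imp hxmem
            simpa using this
          have hheads : ∀ x, rest.head? = some x → x ≠ b :=
            fun x hx => pvHead_dropWhile t x (hrest ▸ hx)
          have hcast : (0 : Int) + 1 + (r.length : Int) = 1 + (r.length : Int) := by ring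
          cases b with
          | true =>
              have hbT : ∀ c : Int, pvMR true (true :: t) 0 c
                  = pvMR true rest 0 (max c (1 + (r.length : Int))) := by
                intro c
                have hbb : (true == true) = true := rfl
                simp only [pvMR, hbb, if_true]
                rw [hsplit, pvMR_run r rest (0 + 1) c hrun, hcast,
                  pvMR_reset rest _ c (by positivity) hheads]
              have hbF : ∀ c : Int, 0 ≤ c → pvMR false (true :: t) 0 c = pvMR false rest 0 c := by
                intro c hc
                have hbb : (true == false) = false := rfl
                simp only [pvMR, hbb, Bool.false_eq_true, if_false]
                rw [max_eq_left hc, hsplit]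
                exact pvMR_skip r rest c hc
                  (fun x hxm => by rw [hrun x hxm]; simp)
              rw [pvAltLoop]
              simp only [if_true]
              rw [ih rest hrestlen _ _ (le_trans hp (le_max_left _ _)) ho, ← hr,
                hbT p, hbF o ho]
          | false =>
              have hbT : ∀ c : Int, 0 ≤ c → pvMR true (false :: t) 0 c = pvMR true rest 0 c := by
                intro c hc
                have hbb : (false == true) = false := rfl
                simp only [pvMR, hbb, Bool.false_eq_true, if_false]
                rw [max_eq_left hc, hsplit]
                exact pvMR_skip r rest c hc
                  (fun x hxm => by rw [hrun x hxm]; simp)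
              have hbF : ∀ c : Int, pvMR false (false :: t) 0 c
                  = pvMR false rest 0 (max c (1 + (r.length : Int))) := by
                intro c
                have hbb : (false == false) = true := rfl
                simp only [pvMR, hbb, if_true]
                rw [hsplit, pvMR_run r rest (0 + 1) c hrun, hcast,
                  pvMR_reset rest _ c (by positivity) hheads]
              rw [pvAltLoop]
              simp only [Bool.false_eq_true, if_false]
              rw [ih rest hrestlen _ _ hp (le_trans ho (le_max_left _ _)), ← hr,
                hbT p hp, hbF o]

-- ===== VERDICT (by name: the statement is the Claim_ definition above) =====
theorem maxAdjacent_spec : Claim_equal_maxAdjacent := by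
  intro ls _
  unfold Spec_maxAdjacent maxAdjacent maxAdjacent_alt
  rw [pvFoldBridge]
  have h1 := pvFoldMR ((ls.filter (fun x => x != 0)).map (fun x => x == 1)) 0 0 0 0
  simp only at h1
  rw [h1]
  rw [pvAltLoopMR ((ls.filter (fun x => x != 0)).map (fun x => x == 1)).length _ le_rfl 0 0 le_rfl le_rfl]
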